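-- pv_equiv track=rewrite | github.com/jailsonpj/FTC | pp2.py | vetor_transicao_a
-- ===== SOURCE A (Python) =====
-- def vetor_transicao_a(estados,matriz):
-- 	lista = []
-- 	matriz_transicao = []
--
-- 	for i in range(estados):
-- 		lista.append(matriz[i][0])
--
-- 	#lista.sort()
--
-- 	for i in range(estados): #matriz de funções de transição
-- 		coluna = []
-- 		matriz_transicao.append(coluna)
--
-- 	for i in range(estados):
-- 		for k in range(estados):
-- 			if(lista[i] == k):
-- 				matriz_transicao[i].append(1)
-- 			else:
-- 				matriz_transicao[i].append(0)
--
--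
-- 	return matriz_transicao
-- ===== SOURCE B (Python) =====
-- def vetor_transicao_a(estados, matriz):
--     lista = [matriz[i][0] for i in range(estados)]
--     colunas = [[int(v == k) for v in lista] for k in range(estados)]
--     return [list(linha) for linha in zip(*colunas)]
-- ===== Notes on version B (the rewrite author's own statement) =====
-- stated objective: alternative
-- what changed: A builds the matrix row by row, appending 1/0 per column in a nested loop; B builds the one-hot COLUMNS (for each state k, the indicator column over lista) and then transposes them with zip(*), a column-major construction with an explicit transpose step.
import Mathlib
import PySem

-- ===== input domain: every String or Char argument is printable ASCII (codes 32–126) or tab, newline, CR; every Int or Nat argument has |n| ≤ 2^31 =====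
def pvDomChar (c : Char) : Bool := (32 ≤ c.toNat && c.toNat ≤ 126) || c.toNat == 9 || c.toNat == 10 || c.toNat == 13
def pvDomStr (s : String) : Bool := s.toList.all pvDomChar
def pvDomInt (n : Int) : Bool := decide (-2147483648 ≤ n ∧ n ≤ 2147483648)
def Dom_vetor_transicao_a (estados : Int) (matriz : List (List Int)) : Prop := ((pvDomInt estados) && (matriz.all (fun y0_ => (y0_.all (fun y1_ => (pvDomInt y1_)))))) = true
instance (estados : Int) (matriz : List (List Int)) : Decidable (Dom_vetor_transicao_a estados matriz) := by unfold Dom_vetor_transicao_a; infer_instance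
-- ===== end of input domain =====

-- B builds the one-hot COLUMNS (per target state k) and transposes them with zip(*),
-- instead of A's row-by-row nested append loop; objective: alternative construction.

-- ===== PORT A =====
-- literal transliteration of A: first loop collects matriz[i][0], then the
-- nested loops append (1 if lista[i]==k else 0) for every column k.
def vetor_transicao_a (estados : Int) (matriz : List (List Int)) : List (List Int) :=
  let lista := (PySem.List.pyRange 0 estados 1).foldl
    (fun acc i => acc ++ [PySem.List.pyGetD (PySem.List.pyGetD matriz i []) 0 0]) []
  (PySem.List.pyRange 0 estados 1).foldl
    (fun mt i =>
      mt ++ [(PySem.List.pyRange 0 estados 1).foldl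
        (fun col k => col ++ [if PySem.List.pyGetD lista i 0 == k then (1:Int) else 0]) []]) []

-- ===== PORT B =====
-- measure lemma cited by pyZipStar's decreasing_by
theorem pvTailSumLe (cols : List (List Int)) :
    ((cols.map List.tail).map List.length).sum ≤ (cols.map List.length).sum := by
  induction cols with
  | nil => simp
  | cons c cs ih =>
    simp only [List.map_cons, List.sum_cons, List.length_tail]
    omega

theorem pvTailSumLt (cols : List (List Int)) (hne : cols ≠ [])
    (hall : ∀ c ∈ cols, c ≠ []) :
    ((cols.map List.tail).map List.length).sum < (cols.map List.length).sum := by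
  cases cols with
  | nil => exact absurd rfl hne
  | cons c cs =>
    have hc : c ≠ [] := hall c (by simp)
    have hlen : 0 < c.length := List.length_pos_iff.mpr hc
    have := pvTailSumLe cs
    simp only [List.map_cons, List.sum_cons, List.length_tail]
    omega

-- hand port of Python's zip(*cols) (rows = tuples of heads until some column is
-- exhausted; zip() with no arguments yields nothing); exact on all inputs.
def pyZipStar (cols : List (List Int)) : List (List Int) :=
  if h : cols = [] ∨ cols.any List.isEmpty then []
  else
    (cols.map (fun c => c.headD 0)) :: pyZipStar (cols.map List.tail)
termination_by (cols.map List.length).sum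
decreasing_by
  have hmap : List.map (fun (x : {x // x ∈ cols}) => x.1.tail) cols.attach
      = List.map List.tail cols := by simp
  rw [hmap]
  exact pvTailSumLt cols (by tauto)
    (by
      intro c hc hcnil
      exact (by tauto : ¬ cols.any List.isEmpty)
        (List.any_eq_true.mpr ⟨c, hc, by simp [hcnil]⟩))

-- transliteration of Source B: lista comprehension, one-hot column per state k,
-- then zip(*colunas) to transpose.
def vetor_transicao_a_alt (estados : Int) (matriz : List (List Int)) : List (List Int) :=
  let lista := (PySem.List.pyRange 0 estados 1).map
    (fun i => PySem.List.pyGetD (PySem.List.pyGetD matriz i []) 0 0)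
  let colunas := (PySem.List.pyRange 0 estados 1).map
    (fun k => lista.map (fun v => if v == k then (1:Int) else 0))
  pyZipStar colunas

-- ===== PRECONDITION & SPEC =====
-- Pre_ excludes exactly the inputs where Python A raises IndexError:
-- some i < estados with matriz[i] missing or an empty row (no value matriz[i][0]).
def Pre_vetor_transicao_a (estados : Int) (matriz : List (List Int)) : Prop :=
  estados.toNat ≤ matriz.length ∧ ∀ row ∈ matriz.take estados.toNat, row ≠ []
instance (estados : Int) (matriz : List (List Int)) : Decidable (Pre_vetor_transicao_a estados matriz) := by
  unfold Pre_vetor_transicao_a; infer_instance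

def pvWitness_vetor_transicao_a : Int × List (List Int) := (2, [[1], [0, 5]])

def Spec_vetor_transicao_a (estados : Int) (matriz : List (List Int)) (out : List (List Int)) : Prop := out = vetor_transicao_a_alt estados matriz
instance (estados : Int) (matriz : List (List Int)) (out : List (List Int)) : Decidable (Spec_vetor_transicao_a estados matriz out) := by unfold Spec_vetor_transicao_a; infer_instance

-- ===== CLAIM (what is proved, stated in full; the proofs are below) =====
def Claim_equal_vetor_transicao_a : Prop := ∀ (estados : Int) (matriz : List (List Int)), Dom_vetor_transicao_a estados matriz → Pre_vetor_transicao_a estados matriz → Spec_vetor_transicao_a estados matriz (vetor_transicao_a estados matriz)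

-- ===== LEMMAS AND PROOFS =====

-- zip(*cols) of a rectangular non-empty family of columns is the transpose.
theorem pvZipStarRect (n : Nat) (cols : List (List Int)) (hne : cols ≠ [])
    (hall : ∀ c ∈ cols, c.length = n) :
    pyZipStar cols = (List.range n).map (fun i => cols.map (fun c => c.getD i 0)) := by
  induction n generalizing cols with
  | zero =>
    rw [pyZipStar, dif_pos]
    · simp
    · right
      cases cols with
      | nil => exact absurd rfl hne
      | cons c cs =>
        have := hall c (by simp)
        exact List.any_eq_true.mpr ⟨c, by simp, by simpa [List.isEmpty_iff, List.length_eq_zero_iff] using this⟩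
  | succ n ih =>
    have hall' : ∀ c ∈ cols, c ≠ [] := by
      intro c hc h
      have := hall c hc; simp [h] at this
    rw [pyZipStar, dif_neg]
    · have htne : cols.map List.tail ≠ [] := by simpa using hne
      have htall : ∀ c ∈ cols.map List.tail, c.length = n := by
        intro c hc
        obtain ⟨d, hd, rfl⟩ := List.mem_map.mp hc
        have := hall d hd
        simp [List.length_tail]; omega
      rw [ih _ htne htall, List.range_succ_eq_map]
      simp only [List.map_cons, List.map_map]
      congr 1
      · apply List.map_congr_left
        intro c hc
        cases c with
        | nil => exact absurd rfl (hall' _ hc)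
        | cons a t => simp
      · apply List.map_congr_left
        intro i _
        simp only [Function.comp_apply]
        apply List.map_congr_left
        intro c hc
        cases c with
        | nil => exact absurd rfl (hall' _ hc)
        | cons a t => simp
    · rintro (h | h)
      · exact hne h
      · obtain ⟨c, hc, hce⟩ := List.any_eq_true.mp h
        exact hall' c hc (List.isEmpty_iff.mp hce)

theorem pvPortsEq (estados : Int) (matriz : List (List Int)) :
    vetor_transicao_a estados matriz = vetor_transicao_a_alt estados matriz := by
  unfold vetor_transicao_a vetor_transicao_a_alt
  rw [PySem.List.foldl_append_singleton_eq_map, PySem.List.foldl_append_singleton_eq_map]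
  simp only [List.nil_append]
  by_cases he : estados ≤ 0
  · rw [PySem.List.pyRange_one_eq_nil he]
    rw [pyZipStar, dif_pos (Or.inl (by simp))]
    simp
  · replace he : 0 < estados := by omega
    have hlen : ((PySem.List.pyRange 0 estados 1).map
        (fun i => PySem.List.pyGetD (PySem.List.pyGetD matriz i []) 0 0)).length = estados.toNat := by
      simp [PySem.List.length_pyRange_one]
    have hcne : (PySem.List.pyRange 0 estados 1).map
        (fun k => ((PySem.List.pyRange 0 estados 1).map
          (fun i => PySem.List.pyGetD (PySem.List.pyGetD matriz i []) 0 0)).map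
            (fun v => if v == k then (1:Int) else 0)) ≠ [] := by
      simp [PySem.List.pyRange_one]
      omega
    rw [pvZipStarRect estados.toNat _ hcne (by
      intro c hc
      obtain ⟨k, _, rfl⟩ := List.mem_map.mp hc
      simp)]
    apply List.ext_getElem
    · simp [PySem.List.length_pyRange_one]
    · intro i h1 h2
      have hi : i < estados.toNat := by
        simpa [PySem.List.length_pyRange_one] using h1
      simp only [List.getElem_map, List.getElem_range, PySem.List.getElem_pyRange_one]
      rw [PySem.List.foldl_append_singleton_eq_map]
      simp only [List.nil_append]
      apply List.ext_getElem
      · simp [PySem.List.length_pyRange_one]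
      · intro k hk1 hk2
        have hk : k < estados.toNat := by
          simpa [PySem.List.length_pyRange_one] using hk1
        simp only [List.getElem_map, PySem.List.getElem_pyRange_one]
        rw [PySem.List.pyGetD_eq_getElem _ 0 (by omega) (by simp only [List.length_map, PySem.List.length_pyRange_one]; omega)]
        rw [List.getD_eq_getElem _ _ (by simp only [List.length_map, hlen]; omega)]
        simp only [List.getElem_map]
        have hti : ((0:Int) + (i:Int)).toNat = i := by omega
        simp only [hti]

-- ===== VERDICT (by name: the statement is the Claim_ definition above) =====
theorem vetor_transicao_a_spec : Claim_equal_vetor_transicao_a := by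
  intro estados matriz _ _
  exact pvPortsEq estados matriz
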